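-- pv_equiv track=rewrite | github.com/isa43461/ADA | proyecto/bracelets_primeraEntrega.py | solve
-- ===== SOURCE A (Python) =====
-- def solve(b1,b2,n):
-- 	'''
-- 	La idea en esta funcion es básicamente sacar la sumatoria de multiplicar cada uno
-- 	de los elementos de las listas (b1[j]*B2[j]), según su respectivo indice.
-- 	Si la sumatoria es igual a 0, significa que la manilla 2 (B2) encaja con la
-- 	manilla 1 (b1). Por lo tanto, se suma al contador(answer) esa manilla que encaja.
-- 	Después, se rota la manilla 2 (se saca el primer elemento y se agrega de ultimo).
-- 	'''
-- 	B2 = b2 ; cont = 0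
-- 	for i in range(n):
-- 		ml = 0
-- 		for j in range(n):
-- 			ml += b1[j]*B2[j]
-- 		if(ml == 0):
-- 			cont += 1
-- 		v = B2.pop(0)
-- 		B2.append(v)
-- 	return cont
-- ===== SOURCE B (Python) =====
-- def solve(b1, b2, n):
--     # Same count, no mutation: read each rotation as a window of b2+b2.
--     # (A rotates b2 in place; B leaves b2 untouched — equivalence is about the return value.)
--     c = b2 + b2
--     return sum(1 for i in range(n)
--                if sum(x * y for x, y in zip(b1, c[i:i + n])) == 0)
-- ===== Notes on version B (the rewrite author's own statement) =====
-- stated objective: alternative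
-- what changed: B replaces A's in-place rotate-and-rescan (pop(0)/append each iteration) with a pure sliding-window read over b2+b2, a zip/sum comprehension with no mutation; Pre excludes exactly the inputs where A raises IndexError (n exceeding a list length); A mutates b2 (rotates it), B does not -- the claim is about the return value.
import Mathlib
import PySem

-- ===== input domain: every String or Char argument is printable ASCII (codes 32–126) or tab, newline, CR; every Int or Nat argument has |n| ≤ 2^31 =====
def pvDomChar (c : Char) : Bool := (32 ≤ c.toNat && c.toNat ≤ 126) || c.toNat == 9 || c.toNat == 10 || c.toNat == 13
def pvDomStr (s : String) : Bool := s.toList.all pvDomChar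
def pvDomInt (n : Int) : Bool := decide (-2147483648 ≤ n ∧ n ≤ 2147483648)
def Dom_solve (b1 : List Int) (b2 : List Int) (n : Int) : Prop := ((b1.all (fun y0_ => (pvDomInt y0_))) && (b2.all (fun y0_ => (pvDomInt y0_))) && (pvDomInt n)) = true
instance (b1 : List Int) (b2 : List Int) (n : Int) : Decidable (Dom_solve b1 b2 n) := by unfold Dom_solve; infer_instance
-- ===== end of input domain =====

-- B replaces A's in-place rotate-and-rescan with a pure sliding-window read over b2 ++ b2 (alternative; same cost).
-- A mutates its argument b2 (rotates it n times); B does not — the equivalence proved here is about the return value only.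

-- ===== PORT A =====
def solve (b1 : List Int) (b2 : List Int) (n : Int) : Int :=
  ((PySem.List.pyRange 0 n 1).foldl (fun (st : List Int × Int) (_i : Int) =>
    let B2 := st.1
    let ml := (PySem.List.pyRange 0 n 1).foldl
      (fun ml j => ml + PySem.List.pyGetD b1 j 0 * PySem.List.pyGetD B2 j 0) 0
    let cont := if ml = 0 then st.2 + 1 else st.2
    match PySem.List.pop? B2 0 with
    | some (v, rest) => (rest ++ [v], cont)
    | none => (B2, cont)) (b2, 0)).2

-- ===== PORT B =====
def solve_alt (b1 : List Int) (b2 : List Int) (n : Int) : Int :=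
  let c := b2 ++ b2
  (PySem.List.pyRange 0 n 1).foldl (fun cont i =>
    if (b1.zip (PySem.List.slice c (some i) (some (i + n)))).foldl
        (fun acc p => acc + p.1 * p.2) 0 = 0
    then cont + 1 else cont) 0

-- ===== PRECONDITION & SPEC =====
-- Pre excludes exactly the inputs on which A raises IndexError: n larger than a list length.
def Pre_solve (b1 : List Int) (b2 : List Int) (n : Int) : Prop :=
  n ≤ b1.length ∧ n ≤ b2.length
instance (b1 : List Int) (b2 : List Int) (n : Int) : Decidable (Pre_solve b1 b2 n) := by
  unfold Pre_solve; infer_instance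
def pvWitness_solve : List Int × List Int × Int := ([1, -1, 2], [2, 2, 1], 3)

def Spec_solve (b1 : List Int) (b2 : List Int) (n : Int) (out : Int) : Prop := out = solve_alt b1 b2 n
instance (b1 : List Int) (b2 : List Int) (n : Int) (out : Int) : Decidable (Spec_solve b1 b2 n out) := by unfold Spec_solve; infer_instance

-- ===== CLAIM (what is proved, stated in full; the proofs are below) =====
def Claim_equal_solve : Prop := ∀ (b1 : List Int) (b2 : List Int) (n : Int), Dom_solve b1 b2 n → Pre_solve b1 b2 n → Spec_solve b1 b2 n (solve b1 b2 n)

-- ===== LEMMAS AND PROOFS =====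

-- rotation by t: what A's state holds after t pop/append steps
def pvRot (xs : List Int) (t : Nat) : List Int := xs.drop t ++ xs.take t

-- the dot product both programs test, in a common closed form
def pvDot (b1 ys : List Int) (k : Nat) : Int :=
  ((List.range k).map (fun j => b1.getD j 0 * ys.getD j 0)).sum

lemma pvRot_step (xs : List Int) (t : Nat) (ht : t < xs.length) :
    pvRot xs (t + 1) = (xs.drop (t + 1) ++ xs.take t) ++ [xs[t]] := by
  unfold pvRot
  rw [List.take_add_one, List.getElem?_eq_getElem ht]
  simp

lemma pvMapRange_eq_zip (k : Nat) : ∀ (xs ys : List Int), k ≤ xs.length → k ≤ ys.length →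
    (List.range k).map (fun j => xs.getD j 0 * ys.getD j 0)
      = (xs.zip (ys.take k)).map (fun p => p.1 * p.2) := by
  induction k with
  | zero => intro xs ys _ _; simp
  | succ j ih =>
    intro xs ys hx hy
    match xs, ys with
    | x :: xs', y :: ys' =>
      rw [List.range_succ_eq_map]
      simp only [List.map_cons, List.map_map, List.take_succ_cons, List.zip_cons_cons]
      simp only [List.getD_cons_zero, Function.comp_def, List.getD_cons_succ]
      exact congrArg _ (ih xs' ys' (by simpa using hx) (by simpa using hy))

lemma pvInnerA (b1 ys : List Int) (k : Nat) :
    (((List.range k).map (fun t : Nat => (t : Int))).foldl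
      (fun ml j => ml + PySem.List.pyGetD b1 j 0 * PySem.List.pyGetD ys j 0) 0)
      = pvDot b1 ys k := by
  rw [List.foldl_map, PySem.List.foldl_add]
  simp [pvDot]

lemma pvInnerB (b1 ys : List Int) (k : Nat) (hx : k ≤ b1.length) (hy : k ≤ ys.length) :
    (b1.zip (ys.take k)).foldl (fun acc p => acc + p.1 * p.2) 0 = pvDot b1 ys k := by
  rw [PySem.List.foldl_add, zero_add, pvDot, pvMapRange_eq_zip k b1 ys hx hy]

lemma pvSliceWindow (b2 : List Int) (t k : Nat) (ht : t < k) (hk : k ≤ b2.length) :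
    PySem.List.slice (b2 ++ b2) (some (t : Int)) (some ((t : Int) + (k : Int)))
      = (pvRot b2 t).take k := by
  have htm : t < b2.length := lt_of_lt_of_le ht hk
  rw [PySem.List.slice_natCast_add, List.drop_append,
      Nat.sub_eq_zero_of_le (le_of_lt htm), List.drop_zero]
  unfold pvRot
  rw [List.take_append, List.take_append, List.take_take, List.length_drop,
      Nat.min_eq_left (by omega)]

lemma pvOuterA (b1 b2 : List Int) (k : Nat) (_hk1 : k ≤ b1.length) (hk2 : k ≤ b2.length) :
    ∀ i ≤ k,
    ((List.range i).foldl (fun (st : List Int × Int) (_t : Nat) =>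
      let B2 := st.1
      let ml := ((List.range k).map (fun t : Nat => (t : Int))).foldl
        (fun ml j => ml + PySem.List.pyGetD b1 j 0 * PySem.List.pyGetD B2 j 0) 0
      let cont := if ml = 0 then st.2 + 1 else st.2
      match PySem.List.pop? B2 0 with
      | some (v, rest) => (rest ++ [v], cont)
      | none => (B2, cont)) (b2, 0))
    = (pvRot b2 i,
       ((List.range i).map (fun t => if pvDot b1 (pvRot b2 t) k = 0 then (1 : Int) else 0)).sum) := by
  intro i
  induction i with
  | zero => intro _; simp [pvRot]
  | succ i ih =>
    intro hik
    have hi : i < b2.length := lt_of_lt_of_le (Nat.lt_of_succ_le hik) hk2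
    rw [List.range_succ, List.foldl_append, ih (Nat.le_of_succ_le hik)]
    simp only [List.foldl_cons, List.foldl_nil]
    have hrot : pvRot b2 i = b2[i] :: (b2.drop (i + 1) ++ b2.take i) := by
      unfold pvRot
      rw [List.drop_eq_getElem_cons hi, List.cons_append]
    rw [List.map_append, List.sum_append, List.map_singleton, List.sum_singleton]
    refine Prod.ext ?_ ?_
    · simp only [hrot, PySem.List.pop?_zero_cons]
      rw [pvRot_step b2 i hi]
    · simp only [hrot, PySem.List.pop?_zero_cons]
      rw [← hrot, pvInnerA b1 (pvRot b2 i) k]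
      by_cases h : pvDot b1 (pvRot b2 i) k = 0 <;> simp [h]

lemma pvCountFold (p : Nat → Prop) [DecidablePred p] (l : List Nat) (a : Int) :
    l.foldl (fun cont t => if p t then cont + 1 else cont) a
      = a + (l.map (fun t => if p t then (1 : Int) else 0)).sum := by
  have : (fun (cont : Int) t => if p t then cont + 1 else cont)
      = fun cont t => cont + (if p t then (1 : Int) else 0) := by
    funext cont t; split <;> simp
  rw [this, PySem.List.foldl_add]

theorem solve_spec : Claim_equal_solve := by
  intro b1 b2 n _hdom hpre
  unfold Spec_solve solve solve_alt
  rcases (by omega : n ≤ 0 ∨ 0 < n) with hn | hn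
  · rw [PySem.List.pyRange_one_eq_nil hn]
    simp
  · obtain ⟨k, rfl⟩ : ∃ k : Nat, n = (k : Int) := ⟨n.toNat, (Int.toNat_of_nonneg (le_of_lt hn)).symm⟩
    obtain ⟨hp1, hp2⟩ := hpre
    have hk1 : k ≤ b1.length := by exact_mod_cast hp1
    have hk2 : k ≤ b2.length := by exact_mod_cast hp2
    rw [PySem.List.pyRange_zero_natCast, List.foldl_map, List.foldl_map,
        pvOuterA b1 b2 k hk1 hk2 k (le_refl k)]
    rw [pvCountFold (fun t => (b1.zip (PySem.List.slice (b2 ++ b2) (some (t : Int))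
          (some ((t : Int) + (k : Int))))).foldl (fun acc p => acc + p.1 * p.2) 0 = 0)
        (List.range k) 0, zero_add]
    refine congrArg List.sum (List.map_congr_left ?_)
    intro t htk
    have htk' : t < k := List.mem_range.mp htk
    rw [pvSliceWindow b2 t k htk' hk2,
        pvInnerB b1 (pvRot b2 t) k hk1 (by simp [pvRot]; omega)]
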